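-- pv_equiv track=rewrite | github.com/sinabro-dev/algorithm-study | leetcode/LEET_2272.py | largestVariance
-- ===== SOURCE A (Python) =====
-- def largestVariance(s: str) -> int:
--     # 만약 s가 두 종류의 문자로만 이뤄졌다면 한 문자를 만날 때 +1, 다른 문자는 -1 해서 variance를 구하면 된다
--     # 그러나 알파벳 26개로 이뤄질 수 있기 때문에 이에 대한 상태 관리가 필요하다
--     # 또한 모든 서브스트링을 훑을 것이기 때문에 반복 작업을 피하기 위해 다이나믹 프로그래밍으로 접근한다
--     # ----------------------------------------------------------------------------------------------------
--     # 위의 방식대로 하면 답을 구하겠으나 시간 초과가 뜬다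
--     # 문제 해결을 위해 주요한 두 값은 서브스트링의 최소 등장 알파벳과 최대 등장 알파벳이다
--     # 이를 위해 N^2 반복을 하며 모두 확인하는 것보다는 문자열을 순행와 역행하여 각 등장 수를 체크하는 방법이 있다
--     # 이때 모든 알파벳 조합을 체크해야 하므로 유일한 알파벳 쌍들을 만들어놓고 시작해야 한다
--
--     max_var = 0
--
--     pairs = list()
--     for a in set(s):
--         for b in set(s):
--             if a == b:
--                 continue
--             pairs.append((a, b))
--
--
--     for _ in range(2):
--         for pair in pairs:
--             cnt_a, cnt_b = 0, 0
--
--             for char in s: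
--                 if char not in pair:
--                     continue
--
--                 if char == pair[0]:
--                     cnt_a += 1
--                 else:
--                     cnt_b += 1
--
--                 if cnt_a < cnt_b:
--                     cnt_a, cnt_b = 0, 0
--                 elif cnt_a > 0 and cnt_b > 0:
--                     max_var = max(max_var, cnt_a - cnt_b)
--
--         s = s[::-1]
--
--     return max_var
-- ===== SOURCE B (Python) =====
-- def largestVariance(s: str) -> int:
--     # Single forward pass per ordered character pair (editorial variant with a
--     # 'lost_b' flag) instead of A's forward+reverse double pass; no pairs list.
--     ans = 0
--     chars = set(s)
--     for a in chars:
--         for b in chars: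
--             if a == b:
--                 continue
--             cnt_a, cnt_b = 0, 0
--             lost_b = False
--             for ch in s:
--                 if ch == a:
--                     cnt_a += 1
--                 elif ch == b:
--                     cnt_b += 1
--                 else:
--                     continue
--                 if cnt_b > 0:
--                     ans = max(ans, cnt_a - cnt_b)
--                 elif lost_b:
--                     ans = max(ans, cnt_a - 1)
--                 if cnt_a < cnt_b:
--                     cnt_a, cnt_b = 0, 0
--                     lost_b = True
--     return ans
-- ===== Notes on version B (the rewrite author's own statement) =====
-- stated objective: faster
-- what changed: Replaced A's forward+reverse double Kadane pass per ordered character pair (with a materialized pairs list) by the editorial single forward pass per pair that keeps a lost_b flag and also credits cnt_a-1 when a b was discarded at a reset, halving the scans and dropping the string reversal.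
import Mathlib
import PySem

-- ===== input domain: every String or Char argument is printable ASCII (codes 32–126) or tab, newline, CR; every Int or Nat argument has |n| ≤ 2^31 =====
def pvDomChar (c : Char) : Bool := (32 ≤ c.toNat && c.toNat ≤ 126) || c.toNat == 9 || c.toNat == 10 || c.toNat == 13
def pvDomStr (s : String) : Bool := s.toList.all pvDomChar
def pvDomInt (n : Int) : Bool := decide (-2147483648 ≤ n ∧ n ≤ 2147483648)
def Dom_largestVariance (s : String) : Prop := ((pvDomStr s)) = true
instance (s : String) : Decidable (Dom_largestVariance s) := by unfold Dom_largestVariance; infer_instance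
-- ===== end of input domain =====

-- B replaces A's forward+reverse double Kadane pass per character pair by a single
-- forward pass with a 'lost_b' flag (the editorial variant) and builds no pairs list.

-- ===== PORT A =====

-- one step of A's inner 'for char in s' loop; state = (cnt_a, cnt_b, max_var)
def stepA (a b : Char) (st : Int × Int × Int) (ch : Char) : Int × Int × Int :=
  if ¬ (ch = a ∨ ch = b) then st
  else
    let ca := if ch = a then st.1 + 1 else st.1
    let cb := if ch = a then st.2.1 else st.2.1 + 1
    if ca < cb then (0, 0, st.2.2)
    else if 0 < ca ∧ 0 < cb then (ca, cb, max st.2.2 (ca - cb))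
    else (ca, cb, st.2.2)

-- A's inner loop over the current string, threading max_var
def passA (l : List Char) (a b : Char) (mv : Int) : Int :=
  (l.foldl (stepA a b) (0, 0, mv)).2.2

-- A's pairs construction from set(s)
def buildPairs (cs : List Char) : List (Char × Char) :=
  cs.foldl (fun acc a =>
    cs.foldl (fun acc2 b => if a = b then acc2 else acc2 ++ [(a, b)]) acc) []

def largestVariance (s : String) : Int :=
  let pairs := buildPairs (PySem.Set.ofList s.toList)
  ((PySem.List.pyRange 0 2 1).foldl
    (fun (st : Int × List Char) _ =>
      (pairs.foldl (fun mv pr => passA st.2 pr.1 pr.2 mv) st.1, st.2.reverse))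
    (0, s.toList)).1

-- ===== PORT B =====

-- tail of B's loop body after the counter update; state = (cnt_a, cnt_b, lost_b, ans)
def stepBrec (ca cb : Int) (lost : Bool) (ans : Int) : Int × Int × Bool × Int :=
  let ans' := if 0 < cb then max ans (ca - cb) else if lost then max ans (ca - 1) else ans
  if ca < cb then (0, 0, true, ans') else (ca, cb, lost, ans')

-- one step of B's 'for ch in s' loop
def stepB (a b : Char) (st : Int × Int × Bool × Int) (ch : Char) : Int × Int × Bool × Int :=
  if ch = a then stepBrec (st.1 + 1) st.2.1 st.2.2.1 st.2.2.2
  else if ch = b then stepBrec st.1 (st.2.1 + 1) st.2.2.1 st.2.2.2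
  else st

-- B's single forward pass for one ordered pair, threading ans
def passB (l : List Char) (a b : Char) (ans : Int) : Int :=
  (l.foldl (stepB a b) (0, 0, false, ans)).2.2.2

def largestVariance_alt (s : String) : Int :=
  let chars := PySem.Set.ofList s.toList
  chars.foldl (fun ans a =>
    chars.foldl (fun ans b => if a = b then ans else passB s.toList a b ans) ans) 0

-- ===== PRECONDITION & SPEC =====
def Spec_largestVariance (s : String) (out : Int) : Prop := out = largestVariance_alt s
instance (s : String) (out : Int) : Decidable (Spec_largestVariance s out) := by unfold Spec_largestVariance; infer_instance

-- ===== CLAIM (what is proved, stated in full; the proofs are below) =====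
def Claim_equal_largestVariance : Prop := ∀ (s : String), Dom_largestVariance s → Spec_largestVariance s (largestVariance s)

-- ===== LEMMAS AND PROOFS =====

-- ---- Boolean abstraction of one ordered pair: true stands for the pair's first char ----

def cntT (l : List Bool) : Int := l.count true
def cntF (l : List Bool) : Int := l.count false
def sumB (l : List Bool) : Int := cntT l - cntF l

def stepF (st : Int × Int × Int) (x : Bool) : Int × Int × Int :=
  let ca := if x then st.1 + 1 else st.1
  let cb := if x then st.2.1 else st.2.1 + 1
  if ca < cb then (0, 0, st.2.2)
  else if 0 < ca ∧ 0 < cb then (ca, cb, max st.2.2 (ca - cb))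
  else (ca, cb, st.2.2)

def stepG (st : Int × Int × Bool × Int) (x : Bool) : Int × Int × Bool × Int :=
  if x then stepBrec (st.1 + 1) st.2.1 st.2.2.1 st.2.2.2
  else stepBrec st.1 (st.2.1 + 1) st.2.2.1 st.2.2.2

def ansF (l : List Bool) : Int := (l.foldl stepF (0, 0, 0)).2.2
def ansG (l : List Bool) : Int := (l.foldl stepG (0, 0, false, 0)).2.2.2

def enc (a b : Char) (l : List Char) : List Bool :=
  (l.filter (fun c => decide (c = a ∨ c = b))).map (fun c => decide (c = a))

-- ---- ghost "current segment" of the Kadane scan ----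

def segStep (g : List Bool) (x : Bool) : List Bool :=
  if sumB (g ++ [x]) < 0 then [] else g ++ [x]

def segOf (p : List Bool) : List Bool := p.foldl segStep []

lemma segOf_concat (p : List Bool) (x : Bool) :
    segOf (p ++ [x]) = segStep (segOf p) x := by
  simp [segOf, List.foldl_append]

lemma sumB_concat (l : List Bool) (x : Bool) :
    sumB (l ++ [x]) = sumB l + (if x then 1 else -1) := by
  cases x <;> simp [sumB, cntT, cntF, List.count_append] <;> ring

lemma cntT_nonneg (l : List Bool) : 0 ≤ cntT l := by simp [cntT]

lemma cntF_nonneg (l : List Bool) : 0 ≤ cntF l := by simp [cntF]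

lemma sumB_le_cntT (l : List Bool) : sumB l ≤ cntT l := by
  have := cntF_nonneg l; simp [sumB] at *; omega

lemma cntT_concat (l : List Bool) (x : Bool) :
    cntT (l ++ [x]) = cntT l + (if x then 1 else 0) := by
  cases x <;> simp [cntT, List.count_append]

lemma cntF_concat (l : List Bool) (x : Bool) :
    cntF (l ++ [x]) = cntF l + (if x then 0 else 1) := by
  cases x <;> simp [cntF, List.count_append]

lemma mem_iff_cntT (l : List Bool) : true ∈ l ↔ 0 < cntT l := by
  rw [← List.count_pos_iff]; simp [cntT]

lemma mem_iff_cntF (l : List Bool) : false ∈ l ↔ 0 < cntF l := by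
  rw [← List.count_pos_iff]; simp [cntF]

lemma sumB_reverse (l : List Bool) : sumB l.reverse = sumB l := by
  simp [sumB, cntT, cntF, List.count_reverse]

lemma seg_suffix (p : List Bool) : segOf p <:+ p := by
  induction p using List.reverseRecOn with
  | nil => simp [segOf]
  | append_singleton p x ih =>
    rw [segOf_concat, segStep]
    split_ifs with h
    · exact List.nil_suffix
    · obtain ⟨u, hu⟩ := ih
      exact ⟨u, by rw [← List.append_assoc, hu]⟩

lemma seg_prefix_nonneg (p : List Bool) : ∀ t, t <+: segOf p → 0 ≤ sumB t := by
  induction p using List.reverseRecOn with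
  | nil =>
    intro t ht
    simp only [segOf, List.foldl_nil] at ht
    rw [List.prefix_nil.mp ht]; simp [sumB, cntT, cntF]
  | append_singleton p x ih =>
    intro t ht
    rw [segOf_concat, segStep] at ht
    split_ifs at ht with h
    · rw [List.prefix_nil.mp ht]; simp [sumB, cntT, cntF]
    · rcases List.prefix_concat_iff.mp ht with h1 | h2
      · rw [h1]; exact le_of_not_gt h
      · exact ih t h2

lemma seg_nonneg (p : List Bool) : 0 ≤ sumB (segOf p) :=
  seg_prefix_nonneg p _ (List.prefix_refl _)

lemma seg_dom (p : List Bool) : ∀ v, v <:+ p → sumB v ≤ sumB (segOf p) := by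
  induction p using List.reverseRecOn with
  | nil =>
    intro v hv; rw [List.suffix_nil.mp hv]; simp [segOf]
  | append_singleton p x ih =>
    intro v hv
    rw [segOf_concat, segStep]
    rcases List.suffix_concat_iff.mp hv with rfl | ⟨v', rfl, hv'⟩
    · split_ifs with h
      · simp [sumB, cntT, cntF]
      · have h1 : (0:Int) ≤ sumB (segOf p ++ [x]) := le_of_not_gt h
        have h2 : sumB ([] : List Bool) = 0 := by simp [sumB, cntT, cntF]
        omega
    · have hi := ih v' hv'
      have hc1 := sumB_concat v' x
      have hc2 := sumB_concat (segOf p) x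
      split_ifs with h
      · have hse : sumB ([] : List Bool) = 0 := by simp [sumB, cntT, cntF]
        rw [hse]; cases x <;> simp at hc1 hc2 <;> omega
      · cases x <;> simp at hc1 hc2 <;> omega

lemma seg_dom_strict (p : List Bool) :
    ∀ v, v <:+ p → segOf p <:+ v → segOf p ≠ v → sumB v ≤ sumB (segOf p) - 1 := by
  induction p using List.reverseRecOn with
  | nil =>
    intro v hv hs hne
    rw [List.suffix_nil.mp hv] at hne
    simp [segOf] at hne
  | append_singleton p x ih =>
    intro v hv hs hne
    rw [segOf_concat, segStep] at hs hne ⊢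
    rcases List.suffix_concat_iff.mp hv with rfl | ⟨v', rfl, hv'⟩
    · exfalso
      split_ifs at hs hne with h
      · exact hne rfl
      · exact (by simp : ¬ segOf p ++ [x] <:+ ([] : List Bool)) hs
    · have hc1 := sumB_concat v' x
      have hc2 := sumB_concat (segOf p) x
      split_ifs at hs hne ⊢ with h
      · have hd := seg_dom p v' hv'
        have hse : sumB ([] : List Bool) = 0 := by simp [sumB, cntT, cntF]
        rw [hse]
        cases x <;> simp at hc1 hc2 <;> omega
      · rcases List.suffix_concat_iff.mp hs with habs | ⟨t, ht, hts⟩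
        · exact absurd habs (by simp)
        · have hteq : t = segOf p := (List.append_cancel_right ht).symm
          subst hteq
          have hne2 : segOf p ≠ v' := fun hh => hne (by rw [hh])
          have hi := ih v' hv' hts hne2
          cases x <;> simp at hc1 hc2 <;> omega

lemma seg_ctx (p : List Bool) : segOf p = p ∨ ∃ q, p = q ++ false :: segOf p := by
  induction p using List.reverseRecOn with
  | nil => left; simp [segOf]
  | append_singleton p x ih =>
    rw [segOf_concat, segStep]
    split_ifs with h
    · have hnn := seg_nonneg p
      have hc := sumB_concat (segOf p) x
      cases x with
      | true => exfalso; simp at hc; omega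
      | false => right; exact ⟨p, by simp⟩
    · rcases ih with h1 | ⟨q, hq⟩
      · left; rw [h1]
      · right
        refine ⟨q, ?_⟩
        conv_lhs => rw [hq]
        simp

-- ---- state correspondence ----

lemma proj4_ite (c : Prop) [Decidable c] (t e : Int × Int × Bool × Int) :
    (if c then t else e).2.2.2 = if c then t.2.2.2 else e.2.2.2 := by split_ifs <;> rfl

lemma stateF_eq (p : List Bool) (m : Int) :
    p.foldl stepF (0, 0, m) =
      (cntT (segOf p), cntF (segOf p), (p.foldl stepF (0, 0, m)).2.2) := by
  induction p using List.reverseRecOn with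
  | nil => simp [segOf, cntT, cntF]
  | append_singleton p x ih =>
    rw [List.foldl_append, List.foldl_cons, List.foldl_nil, ih, segOf_concat, segStep]
    cases x with
    | true =>
      have hc1 : cntT (segOf p ++ [true]) = cntT (segOf p) + 1 := by
        simp [cntT, List.count_append]
      have hc2 : cntF (segOf p ++ [true]) = cntF (segOf p) := by
        simp [cntF, List.count_append]
      have hcond : (sumB (segOf p ++ [true]) < 0) ↔ (cntT (segOf p) + 1 < cntF (segOf p)) := by
        simp only [sumB, hc1, hc2]; omega
      simp only [stepF, if_true, hcond]
      split_ifs with h1 h2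
      · simp [cntT, cntF]
      · rw [hc1, hc2]
      · rw [hc1, hc2]
    | false =>
      have hc1 : cntT (segOf p ++ [false]) = cntT (segOf p) := by
        simp [cntT, List.count_append]
      have hc2 : cntF (segOf p ++ [false]) = cntF (segOf p) + 1 := by
        simp [cntF, List.count_append]
      have hcond : (sumB (segOf p ++ [false]) < 0) ↔ (cntT (segOf p) < cntF (segOf p) + 1) := by
        simp only [sumB, hc1, hc2]; omega
      simp only [stepF, if_false, Bool.false_eq_true, hcond]
      split_ifs with h1 h2
      · simp [cntT, cntF]
      · rw [hc1, hc2]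
      · rw [hc1, hc2]
lemma stateG_eq (p : List Bool) (m : Int) :
    p.foldl stepG (0, 0, false, m) =
      (cntT (segOf p), cntF (segOf p), decide (segOf p ≠ p),
        (p.foldl stepG (0, 0, false, m)).2.2.2) := by
  induction p using List.reverseRecOn with
  | nil => simp [segOf, cntT, cntF]
  | append_singleton p x ih =>
    rw [List.foldl_append, List.foldl_cons, List.foldl_nil, ih, segOf_concat, segStep]
    have hdec : ∀ y : Bool, decide (segOf p ++ [y] ≠ p ++ [y]) = decide (segOf p ≠ p) := by
      intro y
      rw [decide_eq_decide]
      constructor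
      · intro hh he; exact hh (by rw [he])
      · intro hh he; exact hh (List.append_cancel_right he)
    have hnil : ∀ y : Bool, decide (([] : List Bool) ≠ p ++ [y]) = true := by
      intro y
      rw [decide_eq_true_eq]
      intro he
      exact (List.append_ne_nil_of_right_ne_nil p (by simp)) he.symm
    cases x with
    | true =>
      have hc1 : cntT (segOf p ++ [true]) = cntT (segOf p) + 1 := by
        simp [cntT, List.count_append]
      have hc2 : cntF (segOf p ++ [true]) = cntF (segOf p) := by
        simp [cntF, List.count_append]
      have hcond : (sumB (segOf p ++ [true]) < 0) ↔ (cntT (segOf p) + 1 < cntF (segOf p)) := by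
        simp only [sumB, hc1, hc2]; omega
      simp only [stepG, stepBrec, if_true, hcond]
      split_ifs <;>
        first
          | (rw [hnil]; simp [cntT, cntF])
          | rw [hc1, hc2, hdec]
    | false =>
      have hc1 : cntT (segOf p ++ [false]) = cntT (segOf p) := by
        simp [cntT, List.count_append]
      have hc2 : cntF (segOf p ++ [false]) = cntF (segOf p) + 1 := by
        simp [cntF, List.count_append]
      have hcond : (sumB (segOf p ++ [false]) < 0) ↔ (cntT (segOf p) < cntF (segOf p) + 1) := by
        simp only [sumB, hc1, hc2]; omega
      simp only [stepG, stepBrec, if_false, Bool.false_eq_true, hcond]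
      split_ifs <;>
        first
          | (rw [hnil]; simp [cntT, cntF])
          | rw [hc1, hc2, hdec]
-- ---- monotonicity and threading of the running maximum ----

lemma stepF_ans_le (st : Int × Int × Int) (x : Bool) : st.2.2 ≤ (stepF st x).2.2 := by
  simp only [stepF]; split_ifs <;> simp

lemma ansF_state_mono (l : List Bool) (st : Int × Int × Int) :
    st.2.2 ≤ (l.foldl stepF st).2.2 := by
  induction l generalizing st with
  | nil => simp
  | cons x l ih =>
    rw [List.foldl_cons]
    exact le_trans (stepF_ans_le st x) (ih (stepF st x))

lemma stepG_ans_le (st : Int × Int × Bool × Int) (x : Bool) : st.2.2.2 ≤ (stepG st x).2.2.2 := by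
  cases x <;>
    simp only [stepG, stepBrec, if_true, if_false, Bool.false_eq_true] <;>
    split_ifs <;> simp

lemma ansG_state_mono (l : List Bool) (st : Int × Int × Bool × Int) :
    st.2.2.2 ≤ (l.foldl stepG st).2.2.2 := by
  induction l generalizing st with
  | nil => simp
  | cons x l ih =>
    rw [List.foldl_cons]
    exact le_trans (stepG_ans_le st x) (ih (stepG st x))

lemma threadF (l : List Bool) (ca cb m a : Int) :
    (l.foldl stepF (ca, cb, max m a)).2.2 = max m (l.foldl stepF (ca, cb, a)).2.2 := by
  induction l generalizing ca cb a with
  | nil => simp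
  | cons x l ih =>
    rw [List.foldl_cons, List.foldl_cons]
    cases x <;>
      simp only [stepF, if_true, if_false, Bool.false_eq_true] <;>
      split_ifs <;>
      first
        | exact ih _ _ _
        | (rw [max_assoc]; exact ih _ _ _)

lemma threadG (l : List Bool) (ca cb : Int) (lo : Bool) (m a : Int) :
    (l.foldl stepG (ca, cb, lo, max m a)).2.2.2 = max m (l.foldl stepG (ca, cb, lo, a)).2.2.2 := by
  induction l generalizing ca cb lo a with
  | nil => simp
  | cons x l ih =>
    rw [List.foldl_cons, List.foldl_cons]
    cases x <;>
      simp only [stepG, stepBrec, if_true, if_false, Bool.false_eq_true] <;>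
      split_ifs <;>
      first
        | exact ih _ _ _ _
        | (rw [max_assoc]; exact ih _ _ _ _)

lemma ansF_nonneg (l : List Bool) : 0 ≤ ansF l := ansF_state_mono l (0, 0, 0)

lemma ansG_nonneg (l : List Bool) : 0 ≤ ansG l := ansG_state_mono l (0, 0, false, 0)

-- ---- every recorded value is a window sum; every window sum is covered ----

lemma recordsF (l : List Bool) (K : Int) (h0 : 0 ≤ K)
    (h : ∀ w, w <:+: l → false ∈ w → true ∈ w → sumB w ≤ K) : ansF l ≤ K := by
  suffices haux : ∀ p q, l = p ++ q → (p.foldl stepF (0, 0, 0)).2.2 ≤ K by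
    simpa [ansF] using haux l [] (by simp)
  intro p
  induction p using List.reverseRecOn with
  | nil => intro q hq; simpa using h0
  | append_singleton p x ih =>
    intro q hq
    have hp : (p.foldl stepF (0, 0, 0)).2.2 ≤ K := ih (x :: q) (by rw [hq]; simp)
    rw [List.foldl_append, List.foldl_cons, List.foldl_nil, stateF_eq p 0]
    obtain ⟨u, hu⟩ := seg_suffix p
    have hwin : (segOf p ++ [x]) <:+: l := ⟨u, q, by rw [hq, ← List.append_assoc, hu]⟩
    have hc1 := cntT_concat (segOf p) x
    have hc2 := cntF_concat (segOf p) x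
    cases x <;> simp only [stepF, if_true, if_false, Bool.false_eq_true] <;>
      split_ifs with h1 h2 <;> try exact hp
    · -- x = false, record branch
      refine max_le hp ?_
      have hmf : false ∈ segOf p ++ [false] := by simp
      have hmt : true ∈ segOf p ++ [false] := (mem_iff_cntT _).mpr (by simp at h2 ⊢; omega)
      have hK := h _ hwin hmf hmt
      simp only [sumB] at hK
      simp at hc1 hc2 ⊢
      omega
    · -- x = true, record branch
      refine max_le hp ?_
      have hmt : true ∈ segOf p ++ [true] := by simp
      have hmf : false ∈ segOf p ++ [true] := (mem_iff_cntF _).mpr (by simp at h2 ⊢; omega)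
      have hK := h _ hwin hmf hmt
      simp only [sumB] at hK
      simp at hc1 hc2 ⊢
      omega

lemma recordsG (l : List Bool) (K : Int) (h0 : 0 ≤ K)
    (h : ∀ w, w <:+: l → false ∈ w → true ∈ w → sumB w ≤ K) : ansG l ≤ K := by
  suffices haux : ∀ p q, l = p ++ q → (p.foldl stepG (0, 0, false, 0)).2.2.2 ≤ K by
    simpa [ansG] using haux l [] (by simp)
  intro p
  induction p using List.reverseRecOn with
  | nil => intro q hq; simpa using h0
  | append_singleton p x ih =>
    intro q hq
    have hp : (p.foldl stepG (0, 0, false, 0)).2.2.2 ≤ K := ih (x :: q) (by rw [hq]; simp)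
    rw [List.foldl_append, List.foldl_cons, List.foldl_nil, stateG_eq p 0]
    obtain ⟨u, hu⟩ := seg_suffix p
    have hwin : (segOf p ++ [x]) <:+: l := ⟨u, q, by rw [hq, ← List.append_assoc, hu]⟩
    have hTnn := cntT_nonneg (segOf p)
    have hFnn := cntF_nonneg (segOf p)
    have hsdef : sumB (segOf p) = cntT (segOf p) - cntF (segOf p) := rfl
    cases x with
    | true =>
      have hm' : 0 < cntF (segOf p) → cntT (segOf p) + 1 - cntF (segOf p) ≤ K := by
        intro hpos
        have hmf : false ∈ segOf p ++ [true] :=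
          (mem_iff_cntF _).mpr (by rw [cntF_concat]; simpa using hpos)
        have hmt : true ∈ segOf p ++ [true] := by simp
        have hK := h _ hwin hmf hmt
        have hcs := sumB_concat (segOf p) true
        simp at hcs
        omega
      have hl' : segOf p ≠ p → cntF (segOf p) = 0 → cntT (segOf p) ≤ K := by
        intro hnep h0f
        rcases seg_ctx p with hc | ⟨q', hq'⟩
        · exact absurd hc hnep
        by_cases hTz : 0 < cntT (segOf p)
        · have hwin2 : (false :: (segOf p ++ [true])) <:+: l := by
            refine ⟨q', q, ?_⟩
            rw [hq]
            conv_rhs => rw [hq']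
            simp
          have hmt : true ∈ false :: (segOf p ++ [true]) := by simp
          have hmf : false ∈ false :: (segOf p ++ [true]) := by simp
          have hK := h _ hwin2 hmf hmt
          have hval : sumB (false :: (segOf p ++ [true])) = sumB (segOf p) := by
            simp [sumB, cntT, cntF, List.count_append]
          omega
        · omega
      simp only [stepG, stepBrec, if_true]
      rw [proj4_ite]
      simp only
      rw [ite_self]
      split_ifs with h1 h2
      · exact max_le hp (hm' h1)
      · refine max_le hp ?_
        have hnep := of_decide_eq_true h2
        have := hl' hnep (by omega)
        omega
      · exact hp
    | false =>
      have hm' : cntT (segOf p) - (cntF (segOf p) + 1) ≤ K := by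
        by_cases hTz : 0 < cntT (segOf p)
        · have hmf : false ∈ segOf p ++ [false] := by simp
          have hmt : true ∈ segOf p ++ [false] :=
            (mem_iff_cntT _).mpr (by rw [cntT_concat]; simpa using hTz)
          have hK := h _ hwin hmf hmt
          have hcs := sumB_concat (segOf p) false
          simp at hcs
          omega
        · omega
      simp only [stepG, stepBrec, if_false, Bool.false_eq_true]
      rw [proj4_ite]
      simp only
      rw [ite_self]
      split_ifs with h1 h2
      · exact max_le hp hm'
      · refine max_le hp ?_
        omega
      · exact hp
lemma coverG (l w : List Bool) (hw : w <:+: l) (hf : false ∈ w) (ht : true ∈ w) :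
    sumB w ≤ ansG l := by
  obtain ⟨es, et, hl⟩ := hw
  obtain ⟨w', x, rfl⟩ : ∃ w' x, w = w' ++ [x] := by
    rcases List.eq_nil_or_concat w with hnil | ⟨w', x, hcat⟩
    · exact absurd hnil (List.ne_nil_of_mem hf)
    · exact ⟨w', x, by rw [hcat, List.concat_eq_append]⟩
  have hl2 : ansG l = ((((es ++ w') ++ [x]) ++ et).foldl stepG (0, 0, false, 0)).2.2.2 := by
    rw [ansG, ← hl]
    simp [List.append_assoc]
  have hmono : (((es ++ w') ++ [x]).foldl stepG (0, 0, false, 0)).2.2.2 ≤ ansG l := by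
    rw [hl2]
    conv_rhs => rw [List.foldl_append]
    exact ansG_state_mono et _
  refine le_trans ?_ hmono
  rw [List.foldl_append, List.foldl_cons, List.foldl_nil, stateG_eq (es ++ w') 0]
  have hw' : w' <:+ es ++ w' := ⟨es, rfl⟩
  have hdom := seg_dom (es ++ w') w' hw'
  have hcw := sumB_concat w' x
  have hFnn := cntF_nonneg (segOf (es ++ w'))
  have hTnn := cntT_nonneg (segOf (es ++ w'))
  have hsdef : sumB (segOf (es ++ w')) = cntT (segOf (es ++ w')) - cntF (segOf (es ++ w')) := rfl
  cases x with
  | true =>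
    simp only [stepG, stepBrec, if_true]
    rw [proj4_ite]
    simp only
    rw [ite_self]
    by_cases hFS : 0 < cntF (segOf (es ++ w'))
    · rw [if_pos hFS]
      refine le_trans ?_ (le_max_right _ _)
      simp at hcw
      omega
    · have hFS0 : cntF (segOf (es ++ w')) = 0 := by omega
      have hfw' : false ∈ w' := by
        rcases List.mem_append.mp hf with hin | hin
        · exact hin
        · simp at hin
      have hnotS : false ∉ segOf (es ++ w') := fun hmem => by
        have := (mem_iff_cntF _).mp hmem; omega
      have hsw : segOf (es ++ w') <:+ w' := by
        rcases List.suffix_or_suffix_of_suffix hw' (seg_suffix (es ++ w')) with hws | hsw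
        · exact absurd (hws.subset hfw') hnotS
        · exact hsw
      have hnsw : segOf (es ++ w') ≠ w' := by
        intro he
        exact hnotS (by rw [he]; exact hfw')
      have hstrict := seg_dom_strict (es ++ w') w' hw' hsw hnsw
      have hnp : segOf (es ++ w') ≠ es ++ w' := by
        intro he
        have h1 : w' <:+ segOf (es ++ w') := by rw [he]; exact hw'
        exact hnotS (h1.subset hfw')
      rw [if_neg hFS, decide_eq_true hnp, if_pos rfl]
      refine le_trans ?_ (le_max_right _ _)
      simp at hcw
      omega
  | false =>
    simp only [stepG, stepBrec, if_false, Bool.false_eq_true]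
    rw [proj4_ite]
    simp only
    rw [ite_self]
    rw [if_pos (by omega : (0:Int) < cntF (segOf (es ++ w')) + 1)]
    refine le_trans ?_ (le_max_right _ _)
    simp at hcw
    omega
lemma coverRevShape (l s u t : List Bool) (hl : l = s ++ (u ++ [false]) ++ t)
    (hu : u.count false = 0) (h2 : 2 ≤ cntT u) : cntT u - 1 ≤ ansF l := by
  have hl2 : ansF l = ((((s ++ u) ++ [false]) ++ t).foldl stepF (0, 0, 0)).2.2 := by
    rw [ansF, hl]
    simp [List.append_assoc]
  have hmono : (((s ++ u) ++ [false]).foldl stepF (0, 0, 0)).2.2 ≤ ansF l := by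
    rw [hl2]
    conv_rhs => rw [List.foldl_append]
    exact ansF_state_mono t _
  refine le_trans ?_ hmono
  rw [List.foldl_append, List.foldl_cons, List.foldl_nil, stateF_eq (s ++ u) 0]
  have hdomu := seg_dom (s ++ u) u ⟨s, rfl⟩
  have huF : cntF u = 0 := by simp [cntF, hu]
  have hudef : sumB u = cntT u - cntF u := rfl
  have hS := sumB_le_cntT (segOf (s ++ u))
  have hFnn := cntF_nonneg (segOf (s ++ u))
  have hsdef : sumB (segOf (s ++ u)) = cntT (segOf (s ++ u)) - cntF (segOf (s ++ u)) := rfl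
  simp only [stepF, if_false, Bool.false_eq_true]
  rw [if_neg (by omega), if_pos (by constructor <;> omega)]
  refine le_trans ?_ (le_max_right _ _)
  omega
lemma coverF (l w : List Bool) (hw : w <:+: l) (hf : false ∈ w) (ht : true ∈ w) :
    sumB w ≤ max (ansF l) (ansF l.reverse) := by
  by_cases hv0 : sumB w ≤ 0
  · exact le_trans hv0 (le_trans (ansF_nonneg l) (le_max_left _ _))
  have hv1 : 1 ≤ sumB w := by omega
  obtain ⟨es, et, hl⟩ := hw
  obtain ⟨w', x, rfl⟩ : ∃ w' x, w = w' ++ [x] := by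
    rcases List.eq_nil_or_concat w with hnil | ⟨w', x, hcat⟩
    · exact absurd hnil (List.ne_nil_of_mem hf)
    · exact ⟨w', x, by rw [hcat, List.concat_eq_append]⟩
  have hl2 : ansF l = ((((es ++ w') ++ [x]) ++ et).foldl stepF (0, 0, 0)).2.2 := by
    rw [ansF, ← hl]
    simp [List.append_assoc]
  have hmono : (((es ++ w') ++ [x]).foldl stepF (0, 0, 0)).2.2 ≤ ansF l := by
    rw [hl2]
    conv_rhs => rw [List.foldl_append]
    exact ansF_state_mono et _
  have hw' : w' <:+ es ++ w' := ⟨es, rfl⟩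
  have hdom := seg_dom (es ++ w') w' hw'
  have hcw := sumB_concat w' x
  have hS := sumB_le_cntT (segOf (es ++ w'))
  have hFnn := cntF_nonneg (segOf (es ++ w'))
  have hTnn := cntT_nonneg (segOf (es ++ w'))
  have hsdef : sumB (segOf (es ++ w')) = cntT (segOf (es ++ w')) - cntF (segOf (es ++ w')) := rfl
  cases x with
  | false =>
    -- forward pass records the segment sum
    refine le_trans ?_ (le_trans hmono (le_max_left _ _))
    rw [List.foldl_append, List.foldl_cons, List.foldl_nil, stateF_eq (es ++ w') 0]
    simp at hcw
    simp only [stepF, if_false, Bool.false_eq_true]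
    rw [if_neg (by omega), if_pos (by constructor <;> omega)]
    refine le_trans ?_ (le_max_right _ _)
    omega
  | true =>
    by_cases hFS : 0 < cntF (segOf (es ++ w'))
    · refine le_trans ?_ (le_trans hmono (le_max_left _ _))
      rw [List.foldl_append, List.foldl_cons, List.foldl_nil, stateF_eq (es ++ w') 0]
      simp at hcw
      simp only [stepF, if_true]
      rw [if_neg (by omega), if_pos (by constructor <;> omega)]
      refine le_trans ?_ (le_max_right _ _)
      omega
    · -- segment has no b: the reverse pass covers this window
      have hFS0 : cntF (segOf (es ++ w')) = 0 := by omega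
      simp at hcw
      have hfw' : false ∈ w' := by
        rcases List.mem_append.mp hf with hin | hin
        · exact hin
        · simp at hin
      have hnotS : false ∉ segOf (es ++ w') := fun hmem => by
        have := (mem_iff_cntF _).mp hmem; omega
      have hsw : segOf (es ++ w') <:+ w' := by
        rcases List.suffix_or_suffix_of_suffix hw' (seg_suffix (es ++ w')) with hws | hsw
        · exact absurd (hws.subset hfw') hnotS
        · exact hsw
      have hnsw : segOf (es ++ w') ≠ w' := by
        intro he
        exact hnotS (by rw [he]; exact hfw')
      have hstrict := seg_dom_strict (es ++ w') w' hw' hsw hnsw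
      have hnp : segOf (es ++ w') ≠ es ++ w' := by
        intro he
        have h1 : w' <:+ segOf (es ++ w') := by rw [he]; exact hw'
        exact hnotS (h1.subset hfw')
      rcases seg_ctx (es ++ w') with hctx | ⟨q', hq'⟩
      · exact absurd hctx hnp
      have hlrev : l.reverse
          = et.reverse ++ (((segOf (es ++ w') ++ [true]).reverse) ++ [false]) ++ q'.reverse := by
        have hl3 : l = q' ++ (false :: (segOf (es ++ w') ++ [true])) ++ et := by
          have h1 : l = ((es ++ w') ++ [true]) ++ et := by rw [← hl]; simp
          rw [h1]
          conv_lhs => rw [hq']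
          simp
        rw [hl3]
        simp
      have hcnt0 : (segOf (es ++ w') ++ [true]).reverse.count false = 0 := by
        rw [List.count_reverse]
        have : cntF (segOf (es ++ w') ++ [true]) = 0 := by
          rw [cntF_concat]; simp [hFS0]
        simpa [cntF] using this
      have hcntT : cntT ((segOf (es ++ w') ++ [true]).reverse) = cntT (segOf (es ++ w')) + 1 := by
        simp [cntT, List.count_reverse]
      have h2 : 2 ≤ cntT ((segOf (es ++ w') ++ [true]).reverse) := by
        rw [hcntT]; omega
      have hrev := coverRevShape l.reverse et.reverse ((segOf (es ++ w') ++ [true]).reverse)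
        q'.reverse hlrev hcnt0 h2
      refine le_trans ?_ (le_trans hrev (le_max_right _ _))
      rw [hcntT]
      omega
lemma pairEq (l : List Bool) : max (ansF l) (ansF l.reverse) = ansG l := by
  apply le_antisymm
  · refine max_le ?_ ?_
    · exact recordsF l (ansG l) (ansG_nonneg l) (fun w hw hf ht => coverG l w hw hf ht)
    · refine recordsF l.reverse (ansG l) (ansG_nonneg l) (fun w hw hf ht => ?_)
      have hwl : w.reverse <:+: l := by
        have := List.reverse_infix.mpr hw
        simpa using this
      have := coverG l w.reverse hwl (by simpa using hf) (by simpa using ht)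
      simpa [sumB_reverse] using this
  · refine recordsG l (max (ansF l) (ansF l.reverse))
      (le_trans (ansF_nonneg l) (le_max_left _ _)) (fun w hw hf ht => coverF l w hw hf ht)

-- ---- bridges between the char-level ports and the boolean abstraction ----

lemma bridgeF (a b : Char) (hab : a ≠ b) (l : List Char) (st : Int × Int × Int) :
    l.foldl (stepA a b) st = (enc a b l).foldl stepF st := by
  induction l generalizing st with
  | nil => rfl
  | cons c l ih =>
    by_cases hca : c = a
    · subst hca
      have he : enc c b (c :: l) = true :: enc c b l := by simp [enc]
      rw [List.foldl_cons, he, List.foldl_cons]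
      have hstep : stepA c b st c = stepF st true := by simp [stepA, stepF]
      rw [hstep]; exact ih _
    · by_cases hcb : c = b
      · subst hcb
        have he : enc a c (c :: l) = false :: enc a c l := by simp [enc, hca]
        rw [List.foldl_cons, he, List.foldl_cons]
        have hstep : stepA a c st c = stepF st false := by simp [stepA, stepF, hca]
        rw [hstep]; exact ih _
      · have he : enc a b (c :: l) = enc a b l := by simp [enc, hca, hcb]
        rw [List.foldl_cons, he]
        have hstep : stepA a b st c = st := by simp [stepA, hca, hcb]
        rw [hstep]
        exact ih st

lemma bridgeG (a b : Char) (hab : a ≠ b) (l : List Char) (st : Int × Int × Bool × Int) :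
    l.foldl (stepB a b) st = (enc a b l).foldl stepG st := by
  induction l generalizing st with
  | nil => rfl
  | cons c l ih =>
    by_cases hca : c = a
    · subst hca
      have he : enc c b (c :: l) = true :: enc c b l := by simp [enc]
      rw [List.foldl_cons, he, List.foldl_cons]
      have hstep : stepB c b st c = stepG st true := by simp [stepB, stepG]
      rw [hstep]; exact ih _
    · by_cases hcb : c = b
      · subst hcb
        have he : enc a c (c :: l) = false :: enc a c l := by simp [enc, hca]
        rw [List.foldl_cons, he, List.foldl_cons]
        have hstep : stepB a c st c = stepG st false := by simp [stepB, stepG, hca]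
        rw [hstep]; exact ih _
      · have he : enc a b (c :: l) = enc a b l := by simp [enc, hca, hcb]
        rw [List.foldl_cons, he]
        have hstep : stepB a b st c = st := by simp [stepB, hca, hcb]
        rw [hstep]
        exact ih st

lemma enc_reverse (a b : Char) (l : List Char) :
    enc a b l.reverse = (enc a b l).reverse := by
  simp [enc, List.filter_reverse, List.map_reverse]

lemma passA_eq (a b : Char) (hab : a ≠ b) (l : List Char) (m : Int) (hm : 0 ≤ m) :
    passA l a b m = max m (ansF (enc a b l)) := by
  rw [passA, bridgeF a b hab]
  have h0 : max m 0 = m := max_eq_left hm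
  conv_lhs => rw [← h0]
  rw [threadF]
  rfl

lemma passB_eq (a b : Char) (hab : a ≠ b) (l : List Char) (m : Int) (hm : 0 ≤ m) :
    passB l a b m = max m (ansG (enc a b l)) := by
  rw [passB, bridgeG a b hab]
  have h0 : max m 0 = m := max_eq_left hm
  conv_lhs => rw [← h0]
  rw [threadG]
  rfl

-- ---- fold algebra over the pair list ----

def psOf (cs : List Char) : List (Char × Char) :=
  cs.flatMap (fun a => cs.flatMap (fun b => if a = b then [] else [(a, b)]))

lemma buildPairs_eq (cs : List Char) : buildPairs cs = psOf cs := by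
  unfold buildPairs psOf
  have hinner : ∀ acc (a : Char),
      cs.foldl (fun acc2 b => if a = b then acc2 else acc2 ++ [(a, b)]) acc
        = acc ++ cs.flatMap (fun b => if a = b then [] else [(a, b)]) := by
    intro acc a
    rw [← PySem.List.foldl_append_eq_flatMap]
    apply PySem.List.foldl_congr_mem
    intro acc2 bb _
    split_ifs <;> simp
  calc cs.foldl (fun acc a =>
        cs.foldl (fun acc2 b => if a = b then acc2 else acc2 ++ [(a, b)]) acc) []
      = cs.foldl (fun acc a =>
          acc ++ cs.flatMap (fun b => if a = b then [] else [(a, b)])) [] := by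
        apply PySem.List.foldl_congr_mem
        intro acc aa _
        exact hinner acc aa
    _ = [] ++ cs.flatMap (fun a => cs.flatMap (fun b => if a = b then [] else [(a, b)])) := by
        rw [PySem.List.foldl_append_eq_flatMap]
    _ = _ := by simp

lemma nested_eq_psOf (cs : List Char) (h : Int → Char → Char → Int) (z : Int) :
    cs.foldl (fun z a => cs.foldl (fun z b => if a = b then z else h z a b) z) z
      = (psOf cs).foldl (fun z p => h z p.1 p.2) z := by
  rw [psOf, List.foldl_flatMap]
  apply PySem.List.foldl_congr_mem
  intro acc a _
  rw [List.foldl_flatMap]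
  apply PySem.List.foldl_congr_mem
  intro acc2 b _
  split_ifs <;> simp

lemma mem_psOf (cs : List Char) (p : Char × Char) (hp : p ∈ psOf cs) : p.1 ≠ p.2 := by
  simp only [psOf, List.mem_flatMap] at hp
  obtain ⟨a, _, b, _, hmem⟩ := hp
  split_ifs at hmem with hab
  · simp at hmem
  · simp at hmem
    rw [hmem]
    simpa using hab

lemma bm_split (f : (Char × Char) → Int) (ps : List (Char × Char)) (a b : Int) :
    ps.foldl (fun m p => max m (f p)) (max a b) = max a (ps.foldl (fun m p => max m (f p)) b) := by
  induction ps generalizing b with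
  | nil => simp
  | cons p ps ih =>
    rw [List.foldl_cons, List.foldl_cons, max_assoc]
    exact ih (max b (f p))

lemma bm_main (f1 f2 g : (Char × Char) → Int) (ps : List (Char × Char))
    (h : ∀ p ∈ ps, max (f1 p) (f2 p) = g p) :
    ps.foldl (fun m p => max m (f2 p)) (ps.foldl (fun m p => max m (f1 p)) 0)
      = ps.foldl (fun m p => max m (g p)) 0 := by
  induction ps using List.reverseRecOn with
  | nil => simp
  | append_singleton ps p ih =>
    have hmem : ∀ q ∈ ps, max (f1 q) (f2 q) = g q := fun q hq => h q (by simp [hq])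
    have hp := h p (by simp)
    rw [List.foldl_append, List.foldl_append, List.foldl_append,
        List.foldl_cons, List.foldl_nil, List.foldl_cons, List.foldl_nil,
        List.foldl_cons, List.foldl_nil]
    rw [max_comm (List.foldl (fun m p => max m (f1 p)) 0 ps) (f1 p)]
    rw [bm_split, ih hmem]
    omega

lemma pass_fold_eq (F : Int → (Char × Char) → Int) (V : (Char × Char) → Int)
    (hF : ∀ p m, p.1 ≠ p.2 → 0 ≤ m → F m p = max m (V p)) :
    ∀ ps : List (Char × Char), (∀ p ∈ ps, p.1 ≠ p.2) → ∀ z, 0 ≤ z →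
      ps.foldl F z = ps.foldl (fun m p => max m (V p)) z := by
  intro ps
  induction ps with
  | nil => intro _ z _; rfl
  | cons p ps ih =>
    intro hps z hz
    rw [List.foldl_cons, List.foldl_cons, hF p z (hps p (by simp)) hz]
    exact ih (fun q hq => hps q (by simp [hq])) (max z (V p))
      (le_trans hz (le_max_left _ _))

-- ===== VERDICT (by name: the statement is the Claim_ definition above) =====
theorem largestVariance_spec : Claim_equal_largestVariance := by
  intro s _
  unfold Spec_largestVariance
  have hr : PySem.List.pyRange 0 2 1 = [0, 1] := by decide
  have hA : largestVariance s
      = (psOf (PySem.Set.ofList s.toList)).foldl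
          (fun mv pr => passA s.toList.reverse pr.1 pr.2 mv)
          ((psOf (PySem.Set.ofList s.toList)).foldl
            (fun mv pr => passA s.toList pr.1 pr.2 mv) 0) := by
    simp only [largestVariance]
    rw [hr, buildPairs_eq]
    rfl
  have hB : largestVariance_alt s
      = (psOf (PySem.Set.ofList s.toList)).foldl
          (fun mv pr => passB s.toList pr.1 pr.2 mv) 0 := by
    simp only [largestVariance_alt]
    exact nested_eq_psOf (PySem.Set.ofList s.toList) (fun z a b => passB s.toList a b z) 0
  rw [hA, hB]
  rw [pass_fold_eq (fun mv pr => passB s.toList pr.1 pr.2 mv)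
      (fun p => ansG (enc p.1 p.2 s.toList))
      (fun p m hne hm => passB_eq p.1 p.2 hne s.toList m hm)
      _ (mem_psOf _) 0 le_rfl]
  rw [pass_fold_eq (fun mv pr => passA s.toList pr.1 pr.2 mv)
      (fun p => ansF (enc p.1 p.2 s.toList))
      (fun p m hne hm => passA_eq p.1 p.2 hne s.toList m hm)
      _ (mem_psOf _) 0 le_rfl]
  rw [pass_fold_eq (fun mv pr => passA s.toList.reverse pr.1 pr.2 mv)
      (fun p => ansF (enc p.1 p.2 s.toList.reverse))
      (fun p m hne hm => passA_eq p.1 p.2 hne s.toList.reverse m hm)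
      _ (mem_psOf _) _ (PySem.List.le_foldl_max_int _ _ 0).1]
  apply bm_main
  intro p hp
  have : enc p.1 p.2 s.toList.reverse = (enc p.1 p.2 s.toList).reverse := enc_reverse _ _ _
  rw [this]
  exact pairEq _
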